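-- pv_equiv track=rewrite | github.com/zer0who/ProblemSolve | python/programmers/visit_length.py | solution
-- ===== SOURCE A (Python) =====
-- def solution(dirs):
--     answer = 0
--     axis = [0,0]
--     visited = []
--     for i in range(len(dirs)):
--         before_move = axis.copy()
--         if axis[1] < 5 and dirs[i] == "U":
--             axis[1] += 1
--         elif axis[1] > -5 and dirs[i] == "D":
--             axis[1] -= 1
--         elif axis[0] > -5 and dirs[i] == "L":
--             axis[0] -= 1
--         elif axis[0] < 5 and dirs[i] == "R":
--             axis[0] += 1
--         else:
--             continue
--         move = [before_move, axis.copy()]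
--
--         if move not in visited and list(reversed(move)) not in visited:
--             answer += 1
--             visited.append(move)
--
--     return answer
-- ===== SOURCE B (Python) =====
-- def solution(dirs):
--     delta = {"U": (0, 1), "D": (0, -1), "L": (-1, 0), "R": (1, 0)}
--     # pass 1: walk, emitting one integer key per accepted move (base-121 packing of the
--     # undirected edge's two endpoint codes, smaller code first)
--     keys = []
--     x = y = 0
--     for ch in dirs:
--         if ch not in delta:
--             continue
--         dx, dy = delta[ch]
--         nx, ny = x + dx, y + dy
--         if abs(nx) > 5 or abs(ny) > 5:
--             continue
--         a = (x + 5) * 11 + (y + 5)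
--         b = (nx + 5) * 11 + (ny + 5)
--         keys.append(a * 121 + b if a < b else b * 121 + a)
--         x, y = nx, ny
--     # pass 2: sort-then-scan dedup — count runs in the sorted key list
--     keys.sort()
--     count = 0
--     prev = None
--     for k in keys:
--         if k != prev:
--             count += 1
--             prev = k
--     return count
-- ===== Notes on version B (the rewrite author's own statement) =====
-- stated objective: faster
-- what changed: A dedups edges online by scanning a visited list for either orientation of each move; B instead emits one packed integer key per accepted move (base-121 encoding of the undirected edge, smaller endpoint code first), then counts distinct edges offline by sorting the key list and counting runs in a second pass - the per-step scan of the up-to-220-entry visited list disappears entirely.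
import Mathlib
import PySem

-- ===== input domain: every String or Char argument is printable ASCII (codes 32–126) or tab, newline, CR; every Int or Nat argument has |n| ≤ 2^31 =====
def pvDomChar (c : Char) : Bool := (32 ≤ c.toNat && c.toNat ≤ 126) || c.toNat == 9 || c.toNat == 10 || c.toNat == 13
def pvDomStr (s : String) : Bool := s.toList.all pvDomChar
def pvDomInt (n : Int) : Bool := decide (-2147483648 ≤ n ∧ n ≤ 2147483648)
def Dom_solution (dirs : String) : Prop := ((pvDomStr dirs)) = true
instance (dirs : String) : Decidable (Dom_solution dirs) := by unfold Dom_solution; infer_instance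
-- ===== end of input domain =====

-- B replaces A's online visited-list dedup by emitting one packed integer key per accepted
-- move and counting distinct edges offline with a sort-then-scan pass (same return value).

-- ===== PORT A =====
-- shared tail of A's loop body after the elif chain (the 'move'/visited bookkeeping)
def solutionRecord (answer : Int) (before axis : Int × Int)
    (visited : List ((Int × Int) × (Int × Int))) :
    Int × (Int × Int) × List ((Int × Int) × (Int × Int)) :=
  if (before, axis) ∉ visited ∧ (axis, before) ∉ visited then
    (answer + 1, axis, visited ++ [(before, axis)])
  else
    (answer, axis, visited)

def solutionStep (st : Int × (Int × Int) × List ((Int × Int) × (Int × Int))) (c : Char) :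
    Int × (Int × Int) × List ((Int × Int) × (Int × Int)) :=
  let answer := st.1
  let axis := st.2.1
  let visited := st.2.2
  if axis.2 < 5 ∧ c = 'U' then solutionRecord answer axis (axis.1, axis.2 + 1) visited
  else if -5 < axis.2 ∧ c = 'D' then solutionRecord answer axis (axis.1, axis.2 - 1) visited
  else if -5 < axis.1 ∧ c = 'L' then solutionRecord answer axis (axis.1 - 1, axis.2) visited
  else if axis.1 < 5 ∧ c = 'R' then solutionRecord answer axis (axis.1 + 1, axis.2) visited
  else st

def solution (dirs : String) : Int :=
  (dirs.toList.foldl solutionStep (0, (0, 0), [])).1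

-- ===== PORT B =====
def solutionDeltas : PySem.Dict Char (Int × Int) :=
  PySem.Dict.ofList [('U', ((0:Int), (1:Int))), ('D', (0, -1)), ('L', (-1, 0)), ('R', (1, 0))]

-- (x + 5) * 11 + (y + 5)
def solutionEnc (x y : Int) : Int := (x + 5) * 11 + (y + 5)

-- pass 1: 'if ch not in delta: continue' + lookup = Dict.get?; emit one packed key per move
def solutionAltStep (st : List Int × Int × Int) (c : Char) : List Int × Int × Int :=
  match PySem.Dict.get? solutionDeltas c with
  | none => st
  | some (dx, dy) =>
    let nx := st.2.1 + dx
    let ny := st.2.2 + dy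
    if 5 < |nx| ∨ 5 < |ny| then st
    else
      let a := solutionEnc st.2.1 st.2.2
      let b := solutionEnc nx ny
      (st.1 ++ [if a < b then a * 121 + b else b * 121 + a], nx, ny)

-- pass 2 scan: 'if k != prev: count += 1; prev = k'
def solutionScan (pc : Int × Option Int) (k : Int) : Int × Option Int :=
  if pc.2 = some k then pc else (pc.1 + 1, some k)

def solution_alt (dirs : String) : Int :=
  let keys := (dirs.toList.foldl solutionAltStep ([], 0, 0)).1
  let ks := PySem.List.sorted keys (fun k => k) false
  (ks.foldl solutionScan ((0:Int), (none : Option Int))).1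

-- ===== PRECONDITION & SPEC =====
def Spec_solution (dirs : String) (out : Int) : Prop := out = solution_alt dirs
instance (dirs : String) (out : Int) : Decidable (Spec_solution dirs out) := by unfold Spec_solution; infer_instance

-- ===== CLAIM (what is proved, stated in full; the proofs are below) =====
def Claim_equal_solution : Prop := ∀ (dirs : String), Dom_solution dirs → Spec_solution dirs (solution dirs)

-- ===== LEMMAS AND PROOFS =====

-- B's packed key of an undirected edge
def solutionKey (e : (Int × Int) × (Int × Int)) : Int :=
  let a := solutionEnc e.1.1 e.1.2
  let b := solutionEnc e.2.1 e.2.2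
  if a < b then a * 121 + b else b * 121 + a

def solutionBox (p : Int × Int) : Prop :=
  -5 ≤ p.1 ∧ p.1 ≤ 5 ∧ -5 ≤ p.2 ∧ p.2 ≤ 5

-- loop invariant tying A's state (answer, axis, visited) to B's key list
def solutionInv (answer : Int) (axis : Int × Int)
    (visited : List ((Int × Int) × (Int × Int))) (keys : List Int) : Prop :=
  solutionBox axis ∧
  (∀ e ∈ visited, solutionBox e.1 ∧ solutionBox e.2) ∧
  answer = (visited.length : Int) ∧
  (visited.map solutionKey).Nodup ∧
  ∀ k, k ∈ visited.map solutionKey ↔ k ∈ keys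

theorem solutionKey_swap (p q : Int × Int) :
    solutionKey (q, p) = solutionKey (p, q) := by
  unfold solutionKey solutionEnc
  dsimp only
  split_ifs <;> omega

theorem solutionKey_inj (a b : (Int × Int) × (Int × Int))
    (ha1 : solutionBox a.1) (ha2 : solutionBox a.2)
    (hb1 : solutionBox b.1) (hb2 : solutionBox b.2)
    (h : solutionKey a = solutionKey b) :
    a = b ∨ a = (b.2, b.1) := by
  obtain ⟨⟨ax, ay⟩, ⟨aw, az⟩⟩ := a
  obtain ⟨⟨bx, by'⟩, ⟨bw, bz⟩⟩ := b
  unfold solutionKey solutionEnc at h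
  unfold solutionBox at ha1 ha2 hb1 hb2
  simp only [Prod.mk.injEq] at *
  split_ifs at h <;> omega

theorem solutionGet_U : PySem.Dict.get? solutionDeltas 'U' = some ((0:Int), (1:Int)) := by decide
theorem solutionGet_D : PySem.Dict.get? solutionDeltas 'D' = some ((0:Int), (-1:Int)) := by decide
theorem solutionGet_L : PySem.Dict.get? solutionDeltas 'L' = some ((-1:Int), (0:Int)) := by decide
theorem solutionGet_R : PySem.Dict.get? solutionDeltas 'R' = some ((1:Int), (0:Int)) := by decide

theorem solutionGet_none (c : Char) (h1 : c ≠ 'U') (h2 : c ≠ 'D') (h3 : c ≠ 'L') (h4 : c ≠ 'R') :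
    PySem.Dict.get? solutionDeltas c = none := by
  rw [PySem.Dict.get?_eq_none_iff_not_mem_keys]
  have hk : PySem.Dict.keys solutionDeltas = ['U', 'D', 'L', 'R'] := by decide
  simp [hk, h1, h2, h3, h4]

theorem solutionRecord_inv (answer : Int) (ax na : Int × Int)
    (visited : List ((Int × Int) × (Int × Int))) (keys : List Int)
    (hinv : solutionInv answer ax visited keys)
    (hb : solutionBox na) :
    solutionInv (solutionRecord answer ax na visited).1
      (solutionRecord answer ax na visited).2.1
      (solutionRecord answer ax na visited).2.2 (keys ++ [solutionKey (ax, na)]) ∧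
    (solutionRecord answer ax na visited).2.1 = na := by
  obtain ⟨hax, hbound, hlen, hnd, hmem⟩ := hinv
  unfold solutionRecord
  by_cases hc : (ax, na) ∉ visited ∧ (na, ax) ∉ visited
  · rw [if_pos hc]
    have hnotin : solutionKey (ax, na) ∉ visited.map solutionKey := by
      intro hin
      obtain ⟨v, hv, hveq⟩ := List.mem_map.mp hin
      rcases solutionKey_inj v (ax, na) (hbound v hv).1 (hbound v hv).2 hax hb hveq with h | h
      · exact hc.1 (h ▸ hv)
      · exact hc.2 (h ▸ hv)
    refine ⟨⟨hb, ?_, by simp [hlen], ?_, ?_⟩, rfl⟩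
    · intro e he
      rcases List.mem_append.mp he with h | h
      · exact hbound e h
      · simp at h; subst h; exact ⟨hax, hb⟩
    · simp only [List.map_append, List.map_cons, List.map_nil]
      exact List.Nodup.append hnd (List.nodup_singleton _) (by
        intro x hx hx'
        simp at hx'
        exact hnotin (hx' ▸ hx))
    · intro k
      simp only [List.map_append, List.map_cons, List.map_nil, List.mem_append, hmem k]
  · rw [if_neg hc]
    have hold : solutionKey (ax, na) ∈ visited.map solutionKey := by
      rcases not_and_or.mp hc with h | h
      · exact List.mem_map.mpr ⟨(ax, na), not_not.mp h, rfl⟩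
      · exact List.mem_map.mpr ⟨(na, ax), not_not.mp h, solutionKey_swap ax na⟩
    refine ⟨⟨hb, hbound, hlen, hnd, ?_⟩, rfl⟩
    intro k
    rw [List.mem_append]
    constructor
    · intro h; left; exact (hmem k).mp h
    · rintro (h | h)
      · exact (hmem k).mpr h
      · simp at h; subst h; exact hold

theorem solution_step_rel (c : Char) (answer : Int) (axis : Int × Int)
    (visited : List ((Int × Int) × (Int × Int))) (keys : List Int)
    (hinv : solutionInv answer axis visited keys) :
    ∃ a' ax' v' k',
      solutionStep (answer, axis, visited) c = (a', ax', v') ∧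
      solutionAltStep (keys, axis.1, axis.2) c = (k', ax'.1, ax'.2) ∧
      solutionInv a' ax' v' k' := by
  have hbnd := hinv.1
  unfold solutionBox at hbnd
  by_cases hU : c = 'U'
  · subst hU
    by_cases hm : axis.2 < 5
    · obtain ⟨hinv', hax⟩ := solutionRecord_inv answer axis (axis.1, axis.2 + 1) visited keys hinv
        (by simp only [solutionBox]; omega)
      refine ⟨_, _, _, keys ++ [solutionKey (axis, (axis.1, axis.2 + 1))],
        by simp [solutionStep, hm], ?_, hinv'⟩
      rw [hax]
      simp only [solutionAltStep, solutionGet_U]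
      rw [if_neg (by simp only [not_or, not_lt, abs_le]; omega)]
      unfold solutionKey solutionEnc
      simp only [Prod.mk.injEq, List.append_cancel_left_eq, List.cons.injEq, and_true]
      split_ifs <;> omega
    · refine ⟨answer, axis, visited, keys, ?_, ?_, hinv⟩
      · simp only [solutionStep]; split_ifs <;> simp_all
      · simp only [solutionAltStep, solutionGet_U]
        rw [if_pos (by simp only [lt_abs]; omega)]
  · by_cases hD : c = 'D'
    · subst hD
      by_cases hm : -5 < axis.2
      · obtain ⟨hinv', hax⟩ := solutionRecord_inv answer axis (axis.1, axis.2 - 1) visited keys hinv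
          (by simp only [solutionBox]; omega)
        refine ⟨_, _, _, keys ++ [solutionKey (axis, (axis.1, axis.2 - 1))],
          by simp [solutionStep, hm], ?_, hinv'⟩
        rw [hax]
        simp only [solutionAltStep, solutionGet_D]
        rw [if_neg (by simp only [not_or, not_lt, abs_le]; omega)]
        unfold solutionKey solutionEnc
        simp only [Prod.mk.injEq, List.append_cancel_left_eq, List.cons.injEq, and_true]
        split_ifs <;> omega
      · refine ⟨answer, axis, visited, keys, ?_, ?_, hinv⟩
        · simp only [solutionStep]; split_ifs <;> simp_all
        · simp only [solutionAltStep, solutionGet_D]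
          rw [if_pos (by simp only [lt_abs]; omega)]
    · by_cases hL : c = 'L'
      · subst hL
        by_cases hm : -5 < axis.1
        · obtain ⟨hinv', hax⟩ := solutionRecord_inv answer axis (axis.1 - 1, axis.2) visited keys hinv
            (by simp only [solutionBox]; omega)
          refine ⟨_, _, _, keys ++ [solutionKey (axis, (axis.1 - 1, axis.2))],
            by simp [solutionStep, hm], ?_, hinv'⟩
          rw [hax]
          simp only [solutionAltStep, solutionGet_L]
          rw [if_neg (by simp only [not_or, not_lt, abs_le]; omega)]
          unfold solutionKey solutionEnc
          simp only [Prod.mk.injEq, List.append_cancel_left_eq, List.cons.injEq, and_true]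
          split_ifs <;> omega
        · refine ⟨answer, axis, visited, keys, ?_, ?_, hinv⟩
          · simp only [solutionStep]; split_ifs <;> simp_all
          · simp only [solutionAltStep, solutionGet_L]
            rw [if_pos (by simp only [lt_abs]; omega)]
      · by_cases hR : c = 'R'
        · subst hR
          by_cases hm : axis.1 < 5
          · obtain ⟨hinv', hax⟩ := solutionRecord_inv answer axis (axis.1 + 1, axis.2) visited keys hinv
              (by simp only [solutionBox]; omega)
            refine ⟨_, _, _, keys ++ [solutionKey (axis, (axis.1 + 1, axis.2))],
              by simp [solutionStep, hm], ?_, hinv'⟩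
            rw [hax]
            simp only [solutionAltStep, solutionGet_R]
            rw [if_neg (by simp only [not_or, not_lt, abs_le]; omega)]
            unfold solutionKey solutionEnc
            simp only [Prod.mk.injEq, List.append_cancel_left_eq, List.cons.injEq, and_true, true_and]
            split_ifs <;> omega
          · refine ⟨answer, axis, visited, keys, ?_, ?_, hinv⟩
            · simp only [solutionStep]; split_ifs <;> simp_all
            · simp only [solutionAltStep, solutionGet_R]
              rw [if_pos (by simp only [lt_abs]; omega)]
        · refine ⟨answer, axis, visited, keys, ?_, ?_, hinv⟩
          · simp only [solutionStep]; split_ifs <;> simp_all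
          · simp only [solutionAltStep, solutionGet_none c hU hD hL hR]

theorem solution_loop (l : List Char) (answer : Int) (axis : Int × Int)
    (visited : List ((Int × Int) × (Int × Int))) (keys : List Int)
    (hinv : solutionInv answer axis visited keys) :
    solutionInv (l.foldl solutionStep (answer, axis, visited)).1
      (l.foldl solutionStep (answer, axis, visited)).2.1
      (l.foldl solutionStep (answer, axis, visited)).2.2
      (l.foldl solutionAltStep (keys, axis.1, axis.2)).1 := by
  induction l generalizing answer axis visited keys with
  | nil => exact hinv
  | cons c rest ih =>
    obtain ⟨a', ax', v', k', hA, hB, hinv'⟩ := solution_step_rel c answer axis visited keys hinv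
    simp only [List.foldl_cons, hA, hB]
    exact ih a' ax' v' k' hinv'

-- counting runs in a sorted list = cardinality of its element set
theorem solution_card_insert (y : Int) (S : Finset Int) :
    (insert y S).card = (S.erase y).card + 1 := by
  by_cases h : y ∈ S
  · rw [Finset.insert_eq_of_mem h]
    exact (Finset.card_erase_add_one h).symm
  · rw [Finset.erase_eq_self.mpr h, Finset.card_insert_of_notMem h]

theorem solutionScan_aux (l : List Int) (c p : Int)
    (hs : l.Pairwise (· ≤ ·)) (hp : ∀ x ∈ l, p ≤ x) :
    (l.foldl solutionScan (c, some p)).1 = c + ((l.toFinset.erase p).card : Int) := by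
  induction l generalizing c p with
  | nil => simp
  | cons y ys ih =>
    have hys : ys.Pairwise (· ≤ ·) := hs.tail
    have hyle : ∀ x ∈ ys, y ≤ x := fun x hx => (List.pairwise_cons.mp hs).1 x hx
    simp only [List.foldl_cons]
    by_cases hpy : p = y
    · have hstep : solutionScan (c, some p) y = (c, some p) := by
        simp [solutionScan, hpy]
      rw [hstep, ih c p hys (by rw [hpy]; exact hyle)]
      rw [List.toFinset_cons, hpy, Finset.erase_insert_eq_erase]
    · have hstep : solutionScan (c, some p) y = (c + 1, some y) := by
        simp [solutionScan, hpy]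
      rw [hstep, ih (c + 1) y hys hyle]
      have hpnot : p ∉ (y :: ys).toFinset := by
        rw [List.mem_toFinset]
        intro hmem
        rcases List.mem_cons.mp hmem with h | h
        · exact hpy h
        · exact hpy (le_antisymm (hp y (List.mem_cons_self ..)) (hyle p h))
      rw [Finset.erase_eq_self.mpr hpnot, List.toFinset_cons, solution_card_insert]
      push_cast
      ring

theorem solutionScan_top (l : List Int) (hs : l.Pairwise (· ≤ ·)) :
    (l.foldl solutionScan (0, none)).1 = (l.toFinset.card : Int) := by
  cases l with
  | nil => simp
  | cons y ys =>
    simp only [List.foldl_cons]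
    have h1 : solutionScan ((0:Int), (none : Option Int)) y = (1, some y) := by
      simp [solutionScan]
    rw [h1, solutionScan_aux ys 1 y hs.tail
      (fun x hx => (List.pairwise_cons.mp hs).1 x hx)]
    rw [List.toFinset_cons, solution_card_insert]
    push_cast
    ring

-- ===== VERDICT (by name: the statement is the Claim_ definition above) =====
theorem solution_spec : Claim_equal_solution := by
  unfold Claim_equal_solution Spec_solution
  intro dirs _
  have hinv0 : solutionInv 0 ((0:Int), (0:Int)) [] [] := by
    refine ⟨by unfold solutionBox; norm_num, by simp, rfl, List.nodup_nil, by simp⟩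
  have hinvF := solution_loop dirs.toList 0 ((0:Int), (0:Int)) [] [] hinv0
  obtain ⟨-, -, hlen, hnd, hmem⟩ := hinvF
  unfold solution solution_alt
  set A := dirs.toList.foldl solutionStep (0, ((0:Int), (0:Int)), []) with hAdef
  set keys := (dirs.toList.foldl solutionAltStep ([], (0:Int), (0:Int))).1 with hKdef
  have hsorted : (PySem.List.sorted keys (fun k => k) false).Pairwise (· ≤ ·) :=
    PySem.List.sorted_pairwise keys (fun k => k)
  rw [solutionScan_top _ hsorted, hlen]
  have hfs : (A.2.2.map solutionKey).toFinset = keys.toFinset := by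
    apply Finset.ext
    intro k
    simp only [List.mem_toFinset]
    exact hmem k
  have hfs2 : (PySem.List.sorted keys (fun k => k) false).toFinset = keys.toFinset :=
    List.toFinset_eq_of_perm _ _ (PySem.List.sorted_perm keys (fun k => k) false)
  rw [hfs2, ← hfs, List.toFinset_card_of_nodup hnd, List.length_map]
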